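-- pv_equiv track=rewrite | github.com/alancast/LeetCodeProblems | python/meta_problems/score_board_inference_level_2.py | getMinProblemCount
-- ===== SOURCE A (Python) =====
-- def getMinProblemCount(N: int, S: list[int]) -> int:
--     one_remainder_there = two_remainder_there = max_score = second_max_score = 0
--     one_there = False
--
--     # Find top 2 max scores
--     # see if there is a remainder of 1 and 2 ever present and see if 1 is present
--     for score in S:
--         if score % 3 == 1:
--             if score == 1:
--                 one_there = True
--             one_remainder_there = 1
--         elif score % 3 == 2:
--             two_remainder_there = 1
--
--         if score > max_score:
--             second_max_score = max_score
--             max_score = score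
--         elif score != max_score and score > second_max_score:
--             second_max_score = score
--
--     threes = max_score//3
--
--     if max_score % 3 == 0:
--         # See if there are remainders that force us into using a non 3
--         if one_remainder_there > 0 or two_remainder_there > 0:
--             return threes + 1
--
--         return threes
--
--     # Shortcut to remove a question (otherwise logic is what's below)
--     # If we don't have 1 or max_score - 1 in S, we can replace one 3 with 2 of 2
--     if max_score % 3 == 1 and not one_there and second_max_score != max_score - 1:
--         return threes + 1
--
--     # Num questions is 3s plus a 1 and a 2 point question (unless can shortcut above)
--     return threes + one_remainder_there + two_remainder_there
-- ===== SOURCE B (Python) =====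
-- def getMinProblemCount(N: int, S: list[int]) -> int:
--     # Ceiling-based reformulation: answer = ceil(max/3) + one optional extra problem,
--     # decided per residue class of the max; no second-max tracking, no early returns.
--     mx = max(S, default=0)
--     if mx < 0:
--         mx = 0
--     residues = {x % 3 for x in S}
--     base = -(-mx // 3)  # ceil(mx / 3)
--     if mx % 3 == 0:
--         extra = 1 if 1 in residues or 2 in residues else 0
--     elif mx % 3 == 1:
--         extra = 1 if 2 in residues and (1 in S or mx - 1 in S) else 0
--     else:
--         extra = 1 if 1 in residues else 0
--     return base + extra
-- ===== Notes on version B (the rewrite author's own statement) =====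
-- stated objective: alternative
-- what changed: Replaced A's fused scan with five running accumulators and a four-way early-return cascade (including a second-max tracker and a special shortcut branch) by a ceiling-based formula: answer = ceil(max/3) plus one optional extra problem decided per residue class of the max, using a set of residues mod 3 and plain membership tests instead of any maintained loop state.
import Mathlib
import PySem

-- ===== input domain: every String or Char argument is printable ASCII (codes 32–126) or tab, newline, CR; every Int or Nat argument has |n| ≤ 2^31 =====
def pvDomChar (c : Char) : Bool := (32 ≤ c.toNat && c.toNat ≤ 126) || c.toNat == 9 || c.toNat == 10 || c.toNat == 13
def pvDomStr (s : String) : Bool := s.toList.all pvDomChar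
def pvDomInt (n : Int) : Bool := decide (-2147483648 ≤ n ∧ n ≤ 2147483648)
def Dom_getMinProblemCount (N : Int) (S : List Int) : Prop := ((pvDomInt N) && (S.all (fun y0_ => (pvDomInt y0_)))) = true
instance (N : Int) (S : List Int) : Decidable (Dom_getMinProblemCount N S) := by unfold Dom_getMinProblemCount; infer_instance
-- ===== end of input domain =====

-- B replaces A's fused scan (five running accumulators, second-max tracker, four-way early-return
-- cascade) by a ceiling-based formula: ceil(max/3) plus one optional extra problem decided per
-- residue class of the max, over a set of residues mod 3 (objective: alternative; same O(n) cost).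

-- ===== PORT A =====
-- one loop step of A: updates (one_remainder_there, two_remainder_there, max_score, second_max_score, one_there)
def pvStepA (st : Int × Int × Int × Int × Bool) (score : Int) : Int × Int × Int × Int × Bool :=
  let (r1, r2, mx, smx, one) := st
  let (r1, r2, one) :=
    if PySem.Int.mod score 3 = 1 then
      ((1 : Int), r2, if score = 1 then true else one)
    else if PySem.Int.mod score 3 = 2 then (r1, (1 : Int), one)
    else (r1, r2, one)
  if score > mx then (r1, r2, score, mx, one)
  else if score ≠ mx ∧ score > smx then (r1, r2, mx, score, one)
  else (r1, r2, mx, smx, one)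

def getMinProblemCount (N : Int) (S : List Int) : Int :=
  let st := S.foldl pvStepA (0, 0, 0, 0, false)
  let r1 := st.1
  let r2 := st.2.1
  let mx := st.2.2.1
  let smx := st.2.2.2.1
  let one := st.2.2.2.2
  let threes := PySem.Int.floordiv mx 3
  if PySem.Int.mod mx 3 = 0 then
    if r1 > 0 ∨ r2 > 0 then threes + 1 else threes
  else if PySem.Int.mod mx 3 = 1 ∧ one = false ∧ smx ≠ mx - 1 then threes + 1
  else threes + r1 + r2

-- ===== PORT B =====
def getMinProblemCount_alt (N : Int) (S : List Int) : Int :=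
  let mx0 := (PySem.List.max? S (fun x => x)).getD 0      -- max(S, default=0)
  let mx := if mx0 < 0 then 0 else mx0                    -- if mx < 0: mx = 0
  let residues := PySem.Set.ofList (S.map (fun x => PySem.Int.mod x 3))   -- {x % 3 for x in S}
  let base := -(PySem.Int.floordiv (-mx) 3)               -- -(-mx // 3) = ceil(mx/3)
  let extra : Int :=
    if PySem.Int.mod mx 3 = 0 then
      if (1 : Int) ∈ residues ∨ (2 : Int) ∈ residues then 1 else 0
    else if PySem.Int.mod mx 3 = 1 then
      if (2 : Int) ∈ residues ∧ ((1 : Int) ∈ S ∨ (mx - 1) ∈ S) then 1 else 0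
    else
      if (1 : Int) ∈ residues then 1 else 0
  base + extra

-- ===== PRECONDITION & SPEC =====
def Spec_getMinProblemCount (N : Int) (S : List Int) (out : Int) : Prop := out = getMinProblemCount_alt N S
instance (N : Int) (S : List Int) (out : Int) : Decidable (Spec_getMinProblemCount N S out) := by unfold Spec_getMinProblemCount; infer_instance

-- ===== CLAIM (what is proved, stated in full; the proofs are below) =====
def Claim_equal_getMinProblemCount : Prop := ∀ (N : Int) (S : List Int), Dom_getMinProblemCount N S → Spec_getMinProblemCount N S (getMinProblemCount N S)

-- ===== LEMMAS AND PROOFS =====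

-- closed forms for A's loop state: running max (floored at 0) and second max
def pvM (S : List Int) : Int := S.foldl max 0
def pvSM (S : List Int) : Int := (S.filter (fun x => x < pvM S)).foldl max 0

theorem le_or_lt' (a b : Int) : a ≤ b ∨ b < a := by omega

theorem foldl_max_init_le (l : List Int) (i : Int) : i ≤ l.foldl max i := by
  induction l generalizing i with
  | nil => simp
  | cons a t ih => exact le_trans (le_max_left i a) (ih _)

theorem le_foldl_max_of_mem {l : List Int} {x : Int} (i : Int) (h : x ∈ l) :
    x ≤ l.foldl max i := by
  induction l generalizing i with
  | nil => cases h
  | cons a t ih =>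
    rcases List.mem_cons.mp h with rfl | hm
    · exact le_trans (le_max_right i x) (foldl_max_init_le t _)
    · exact ih _ hm

theorem foldl_max_eq_init_or_mem (l : List Int) (i : Int) :
    l.foldl max i = i ∨ l.foldl max i ∈ l := by
  induction l generalizing i with
  | nil => left; rfl
  | cons a t ih =>
    rcases ih (max i a) with h | h
    · rcases le_or_lt' a i with hle | hlt
      · left; simpa [max_eq_left hle] using h
      · right
        have hfold : List.foldl max i (a :: t) = a := by
          simp only [List.foldl]
          rw [max_eq_right hlt.le] at h ⊢
          exact h
        rw [hfold]
        exact List.mem_cons_self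
    · right; exact List.mem_cons_of_mem _ h

theorem mem_le_pvM {S : List Int} {x : Int} (h : x ∈ S) : x ≤ pvM S :=
  le_foldl_max_of_mem 0 h

-- foldl max with the initial value pulled out
theorem foldl_max_max (l : List Int) (a b : Int) :
    l.foldl max (max a b) = max a (l.foldl max b) := by
  induction l generalizing b with
  | nil => rfl
  | cons x t ih => simp only [List.foldl, max_assoc, ih]

-- B's clamped max(S, default=0) is A's running max pvM
theorem clamp_max?_eq_pvM (S : List Int) :
    (if ((PySem.List.max? S (fun x => x)).getD 0) < 0 then 0
     else (PySem.List.max? S (fun x => x)).getD 0) = pvM S := by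
  cases S with
  | nil => simp [pvM, PySem.List.max?]
  | cons x t =>
    rw [PySem.List.max?_id_cons]
    have h : pvM (x :: t) = max 0 (t.foldl max x) := foldl_max_max t 0 x
    rw [h]
    simp only [Option.getD_some]
    rcases le_or_lt' 0 (t.foldl max x) with hle | hlt
    · rw [if_neg (by omega), max_eq_right hle]
    · rw [if_pos hlt, max_eq_left hlt.le]

-- evaluate one step of A's loop on an explicit state
theorem step_eval (r1 r2 mx smx : Int) (one : Bool) (a : Int) :
    pvStepA (r1, r2, mx, smx, one) a =
      ((if PySem.Int.mod a 3 = 1 then 1 else r1),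
       (if PySem.Int.mod a 3 = 2 then 1 else r2),
       (if mx < a then a else mx),
       (if mx < a then mx else if a ≠ mx ∧ smx < a then a else smx),
       (one || decide (a = 1))) := by
  have h1 : PySem.Int.mod (1 : Int) 3 = 1 := by decide
  unfold pvStepA
  by_cases ha : a = 1 <;> split_ifs <;> simp_all <;>
    split_ifs <;> simp_all <;> try omega

theorem pvM_append (l : List Int) (a : Int) : pvM (l ++ [a]) = max (pvM l) a := by
  simp [pvM, List.foldl_append]

theorem pvSM_append (l : List Int) (a : Int) :
    pvSM (l ++ [a]) =
      (if pvM l < a then pvM l else if a ≠ pvM l ∧ pvSM l < a then a else pvSM l) := by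
  rcases lt_trichotomy (pvM l) a with hlt | heq | hgt
  · have hmx : pvM (l ++ [a]) = a := by rw [pvM_append]; exact max_eq_right hlt.le
    have hfilter : (l ++ [a]).filter (fun x => x < pvM (l ++ [a])) = l := by
      rw [hmx, List.filter_append, List.filter_eq_self.2 (fun x hx => by
        simpa using lt_of_le_of_lt (mem_le_pvM hx) hlt)]
      simp
    simp only [pvSM, hfilter, if_pos hlt]
    rfl
  · have hmx : pvM (l ++ [a]) = pvM l := by rw [pvM_append, heq, max_self]
    have hfilter : (l ++ [a]).filter (fun x => x < pvM (l ++ [a])) =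
        l.filter (fun x => x < pvM l) := by
      rw [hmx, List.filter_append]
      simp [heq]
    simp [pvSM, hfilter, heq]
  · have hmx : pvM (l ++ [a]) = pvM l := by rw [pvM_append]; exact max_eq_left hgt.le
    have hfilter : (l ++ [a]).filter (fun x => x < pvM (l ++ [a])) =
        l.filter (fun x => x < pvM l) ++ [a] := by
      rw [hmx, List.filter_append]
      simp [hgt]
    rw [pvSM, hfilter, List.foldl_append]
    have hne : a ≠ pvM l := ne_of_lt hgt
    simp only [List.foldl, if_neg (not_lt.2 hgt.le), hne, ne_eq, not_false_iff, true_and]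
    rw [pvSM, max_def]
    split_ifs <;> omega

-- A's loop computes exactly these aggregates
theorem loop_spec (S : List Int) :
    S.foldl pvStepA (0, 0, 0, 0, false) =
      ((if S.any (fun x => PySem.Int.mod x 3 = 1) then (1 : Int) else 0),
       (if S.any (fun x => PySem.Int.mod x 3 = 2) then (1 : Int) else 0),
       pvM S, pvSM S, decide ((1 : Int) ∈ S)) := by
  induction S using List.reverseRecOn with
  | nil => simp [pvM, pvSM]
  | append_singleton l a ih =>
    rw [List.foldl_append, ih]
    simp only [List.foldl, step_eval, pvM_append, pvSM_append]
    refine Prod.ext ?_ (Prod.ext ?_ (Prod.ext ?_ (Prod.ext ?_ ?_)))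
    · by_cases h : a % 3 = 1 <;> by_cases h2 : ∃ x ∈ l, x % 3 = 1 <;>
        simp [List.any_append, h, h2]
    · by_cases h : a % 3 = 2 <;> by_cases h2 : ∃ x ∈ l, x % 3 = 2 <;>
        simp [List.any_append, h, h2]
    · simp [max_def]
      split_ifs <;> omega
    · rfl
    · simp [List.mem_append]
      by_cases h : (1 : Int) ∈ l
      · simp [h]
      · simp [h, eq_comm]

-- the key equivalence: when max%3 = 1 and 1 ∉ S, A's second-max test equals B's membership test
theorem key_iff (S : List Int) (h1 : pvM S % 3 = 1) (h2 : (1 : Int) ∉ S) :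
    pvSM S = pvM S - 1 ↔ (pvM S - 1) ∈ S := by
  have hnn : 0 ≤ pvM S := foldl_max_init_le S 0
  have hne1 : pvM S ≠ 1 := by
    intro h
    rcases foldl_max_eq_init_or_mem S 0 with h0 | hmem
    · have hz : pvM S = 0 := h0
      omega
    · exact h2 (h ▸ hmem)
  have h4 : 4 ≤ pvM S := by omega
  have hSM0 : pvSM S = 0 ∨ pvSM S ∈ S.filter (fun x => x < pvM S) :=
    foldl_max_eq_init_or_mem _ 0
  constructor
  · intro h
    rcases hSM0 with h0' | hmem
    · omega
    · exact h ▸ List.mem_of_mem_filter hmem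
  · intro hmem
    have hin : (pvM S - 1) ∈ S.filter (fun x => x < pvM S) :=
      List.mem_filter.2 ⟨hmem, by simp⟩
    have hle : pvM S - 1 ≤ pvSM S := le_foldl_max_of_mem 0 hin
    have hge : pvSM S ≤ pvM S - 1 := by
      rcases hSM0 with h0' | hm
      · omega
      · have hlt : pvSM S < pvM S := by simpa using List.of_mem_filter hm
        omega
    omega

-- when pvM S has a nonzero residue, pvM S itself is an element of S
theorem pvM_mem_of_mod_ne (S : List Int) (h : pvM S % 3 ≠ 0) : pvM S ∈ S := by
  rcases foldl_max_eq_init_or_mem S 0 with h0 | hmem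
  · exact absurd (by rw [show pvM S = 0 from h0]; decide) h
  · exact hmem

-- ===== VERDICT (by name: the statement is the Claim_ definition above) =====
theorem getMinProblemCount_spec : Claim_equal_getMinProblemCount := by
  intro N S _
  unfold Spec_getMinProblemCount getMinProblemCount getMinProblemCount_alt
  rw [loop_spec]
  have hM0 : 0 ≤ pvM S := foldl_max_init_le S 0
  by_cases h0 : (3 : Int) ∣ pvM S
  · by_cases a1 : ∃ x ∈ S, x % 3 = 1 <;> by_cases a2 : ∃ x ∈ S, x % 3 = 2 <;>
      simp [clamp_max?_eq_pvM, h0, a1, a2] <;> omega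
  · have hmod : pvM S % 3 ≠ 0 := fun hz => h0 (Int.dvd_of_emod_eq_zero hz)
    have hmem : pvM S ∈ S := pvM_mem_of_mod_ne S hmod
    by_cases hm1 : pvM S % 3 = 1
    · have a1 : ∃ x ∈ S, x % 3 = 1 := ⟨pvM S, hmem, hm1⟩
      by_cases h1 : (1 : Int) ∈ S
      · by_cases a2 : ∃ x ∈ S, x % 3 = 2 <;>
          simp [clamp_max?_eq_pvM, hm1, h1, a1, a2] <;> omega
      · by_cases hs : pvSM S = pvM S - 1
        · have hmm := (key_iff S hm1 h1).1 hs
          by_cases a2 : ∃ x ∈ S, x % 3 = 2 <;>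
            simp [clamp_max?_eq_pvM, hm1, h1, hs, hmm, a1, a2] <;> omega
        · have hmm : (pvM S - 1) ∉ S := fun hm => hs ((key_iff S hm1 h1).2 hm)
          simp [clamp_max?_eq_pvM, hm1, h1, hs, hmm]
          omega
    · have hm2 : pvM S % 3 = 2 := by omega
      have a2 : ∃ x ∈ S, x % 3 = 2 := ⟨pvM S, hmem, hm2⟩
      by_cases a1 : ∃ x ∈ S, x % 3 = 1 <;>
        simp [clamp_max?_eq_pvM, hm2, a1, a2] <;> omega
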